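-- pv_equiv track=rewrite | github.com/rithmschool/slowcrmv2 | project/users/views.py | get_pipes_dollars_tags_tuples
-- ===== SOURCE A (Python) =====
-- def get_pipes_dollars_tags_tuples(content):
--     pipes_dollars_tags_arrof_tuples = [[], [], []]
--     if content.count('|') == 2 and content[0] == '|' and content[len(content)-1] == '|':
--         return [[(0, (len(content)-1))], [], []]
--     if content.count('*') == 2 and content[0] == '*' and content[len(content)-1] == '*':
--         return [[], [], [(0, (len(content)-1))]]
--     if content.count('$') == 2 and content[0] == '$' and content[len(content)-1] == '$':
--         return [[], [(0, (len(content)-1))], []]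
--     for idx, char in enumerate(content):
--         if idx != (len(content)-1):
--             if char in ['$', '|', '*'] and content[idx+1] != ' ':
--                 if (content[idx-1] != char or idx == 0) and content[idx+1] != char:
--                     substr = content[(idx+1):(len(content))]
--                     next_match = substr.find(char)
--                     if next_match != -1:
--                         if substr[next_match-1] != ' ':
--                             if str(set(content[idx:(idx+next_match+2)])) != "{'" + char + "'}":
--                                 pipes_dollars_tags_arrof_tuples[0].append(tuple([idx, (idx+next_match+1)])) if char == '|' else None
--                                 pipes_dollars_tags_arrof_tuples[1].append(tuple([idx, (idx+next_match+1)])) if char == '$' else None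
--                                 pipes_dollars_tags_arrof_tuples[2].append(tuple([idx, (idx+next_match+1)])) if char == '*' else None
--     return  pipes_dollars_tags_arrof_tuples
-- ===== SOURCE B (Python) =====
-- def get_pipes_dollars_tags_tuples(content):
--     # Whole-string special cases (exactly two of the delimiter, at both ends).
--     if content.count('|') == 2 and content[0] == '|' and content[-1] == '|':
--         return [[(0, len(content) - 1)], [], []]
--     if content.count('*') == 2 and content[0] == '*' and content[-1] == '*':
--         return [[], [], [(0, len(content) - 1)]]
--     if content.count('$') == 2 and content[0] == '$' and content[-1] == '$':
--         return [[], [(0, len(content) - 1)], []]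
--     # One forward pass: pair each delimiter occurrence with the previous
--     # occurrence of the same delimiter remembered in `last`.
--     buckets = {'|': 0, '$': 1, '*': 2}
--     result = [[], [], []]
--     last = {}
--     for j, c in enumerate(content):
--         k = buckets.get(c)
--         if k is None:
--             continue
--         p = last.get(c)
--         if p is not None:
--             if (content[p + 1] != ' ' and content[p + 1] != c
--                     and (p == 0 or content[p - 1] != c)
--                     and content[j - 1] != ' '):
--                 result[k].append((p, j))
--         last[c] = j
--     return result
-- ===== Notes on version B (the rewrite author's own statement) =====
-- stated objective: faster
-- what changed: A pairs each delimiter occurrence with the NEXT one by slicing the rest of the string and running str.find (plus a set() scan) at every delimiter, which is quadratic; B makes one forward pass that remembers the last seen position of each delimiter in a dict and emits the pair when the closing occurrence is reached, with O(1) work per character and no slicing.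
import Mathlib
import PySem

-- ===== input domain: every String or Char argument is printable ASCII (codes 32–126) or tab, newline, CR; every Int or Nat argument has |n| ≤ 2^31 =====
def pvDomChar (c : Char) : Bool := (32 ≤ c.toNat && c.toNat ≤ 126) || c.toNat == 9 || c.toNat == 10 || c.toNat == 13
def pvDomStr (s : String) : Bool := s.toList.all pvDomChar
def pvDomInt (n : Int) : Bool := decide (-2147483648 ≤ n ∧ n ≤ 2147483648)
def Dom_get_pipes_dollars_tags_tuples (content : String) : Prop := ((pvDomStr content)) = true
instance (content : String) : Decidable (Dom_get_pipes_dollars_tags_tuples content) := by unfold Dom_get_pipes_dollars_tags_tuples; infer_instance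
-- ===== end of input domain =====

-- B replaces A's per-delimiter slice + str.find forward search (quadratic) by a single
-- forward pass remembering the last occurrence of each delimiter (linear).

abbrev pvTrip := List (Int × Int) × List (Int × Int) × List (Int × Int)

-- ===== PORT A =====
def pvStepA (l : List Char) (idx : Nat) (ch : Char) (acc : pvTrip) : pvTrip :=
  if idx ≠ l.length - 1 then
    if (ch ∈ ['$', '|', '*']) ∧ PySem.List.pyGet? l ((idx : Int) + 1) ≠ some ' ' then
      if (PySem.List.pyGet? l ((idx : Int) - 1) ≠ some ch ∨ idx = 0) ∧
          PySem.List.pyGet? l ((idx : Int) + 1) ≠ some ch then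
        let substr := PySem.List.slice l (some ((idx : Int) + 1)) (some (PySem.List.len l))
        let next_match := PySem.Chars.find substr [ch]
        if next_match ≠ -1 then
          if PySem.List.pyGet? substr (next_match - 1) ≠ some ' ' then
            -- str(set(content[idx:(idx+next_match+2)])) != "{'" + char + "'}": the slice begins
            -- with ch itself, so Python's test holds iff some char of that slice differs from ch
            if (PySem.List.slice l (some (idx : Int)) (some ((idx : Int) + next_match + 2))).any
                (fun d => d ≠ ch) then
              let pr : Int × Int := ((idx : Int), (idx : Int) + next_match + 1)
              let acc1 := if ch = '|' then (acc.1 ++ [pr], acc.2.1, acc.2.2) else acc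
              let acc2 := if ch = '$' then (acc1.1, acc1.2.1 ++ [pr], acc1.2.2) else acc1
              if ch = '*' then (acc2.1, acc2.2.1, acc2.2.2 ++ [pr]) else acc2
            else acc
          else acc
        else acc
      else acc
    else acc
  else acc

def pvLoopA (l : List Char) : List Char → Nat → pvTrip → pvTrip
  | [], _, acc => acc
  | ch :: rest, idx, acc => pvLoopA l rest (idx + 1) (pvStepA l idx ch acc)

def get_pipes_dollars_tags_tuples (content : String) : List (List (Int × Int)) :=
  let l := content.toList
  if PySem.List.count l '|' = 2 ∧ PySem.List.pyGet? l 0 = some '|' ∧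
      PySem.List.pyGet? l (PySem.List.len l - 1) = some '|' then
    [[((0 : Int), PySem.List.len l - 1)], [], []]
  else if PySem.List.count l '*' = 2 ∧ PySem.List.pyGet? l 0 = some '*' ∧
      PySem.List.pyGet? l (PySem.List.len l - 1) = some '*' then
    [[], [], [((0 : Int), PySem.List.len l - 1)]]
  else if PySem.List.count l '$' = 2 ∧ PySem.List.pyGet? l 0 = some '$' ∧
      PySem.List.pyGet? l (PySem.List.len l - 1) = some '$' then
    [[], [((0 : Int), PySem.List.len l - 1)], []]
  else
    let t := pvLoopA l l 0 ([], [], [])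
    [t.1, t.2.1, t.2.2]

-- ===== PORT B =====
def pvBuckets : PySem.Dict Char Nat := PySem.Dict.ofList [('|', 0), ('$', 1), ('*', 2)]

-- the `if` body of Source B's loop: all indices are in range there (0 ≤ p-1, p+1 < j+1 ≤ len l)
def pvK (l : List Char) (c : Char) (p j : Nat) : Bool :=
  l.getD (p + 1) ' ' ≠ ' ' && l.getD (p + 1) ' ' ≠ c &&
    (p == 0 || l.getD (p - 1) ' ' ≠ c) && l.getD (j - 1) ' ' ≠ ' '

def pvStepB (l : List Char) (j : Nat) (c : Char) (st : PySem.Dict Char Nat × pvTrip) :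
    PySem.Dict Char Nat × pvTrip :=
  match pvBuckets.get? c with
  | none => st
  | some k =>
    let acc :=
      match st.1.get? c with
      | none => st.2
      | some p =>
        if pvK l c p j then
          let pr : Int × Int := ((p : Int), (j : Int))
          if k = 0 then (st.2.1 ++ [pr], st.2.2.1, st.2.2.2)
          else if k = 1 then (st.2.1, st.2.2.1 ++ [pr], st.2.2.2)
          else (st.2.1, st.2.2.1, st.2.2.2 ++ [pr])
        else st.2
    (st.1.insert c j, acc)

def pvLoopB (l : List Char) : List Char → Nat → PySem.Dict Char Nat × pvTrip →
    PySem.Dict Char Nat × pvTrip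
  | [], _, st => st
  | c :: rest, j, st => pvLoopB l rest (j + 1) (pvStepB l j c st)

def get_pipes_dollars_tags_tuples_alt (content : String) : List (List (Int × Int)) :=
  let l := content.toList
  if PySem.List.count l '|' = 2 ∧ PySem.List.pyGet? l 0 = some '|' ∧
      PySem.List.pyGet? l (-1) = some '|' then
    [[((0 : Int), PySem.List.len l - 1)], [], []]
  else if PySem.List.count l '*' = 2 ∧ PySem.List.pyGet? l 0 = some '*' ∧
      PySem.List.pyGet? l (-1) = some '*' then
    [[], [], [((0 : Int), PySem.List.len l - 1)]]
  else if PySem.List.count l '$' = 2 ∧ PySem.List.pyGet? l 0 = some '$' ∧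
      PySem.List.pyGet? l (-1) = some '$' then
    [[], [((0 : Int), PySem.List.len l - 1)], []]
  else
    let st := pvLoopB l l 0 (PySem.Dict.empty, ([], [], []))
    [st.2.1, st.2.2.1, st.2.2.2]

-- ===== PRECONDITION & SPEC =====
def Spec_get_pipes_dollars_tags_tuples (content : String) (out : List (List (Int × Int))) : Prop := out = get_pipes_dollars_tags_tuples_alt content
instance (content : String) (out : List (List (Int × Int))) : Decidable (Spec_get_pipes_dollars_tags_tuples content out) := by unfold Spec_get_pipes_dollars_tags_tuples; infer_instance

-- ===== CLAIM (what is proved, stated in full; the proofs are below) =====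
def Claim_equal_get_pipes_dollars_tags_tuples : Prop := ∀ (content : String), Dom_get_pipes_dollars_tags_tuples content → Spec_get_pipes_dollars_tags_tuples content (get_pipes_dollars_tags_tuples content)

-- ===== LEMMAS AND PROOFS =====

-- next occurrence of c in a suffix, as an offset into that suffix
def pvNext (c : Char) (s : List Char) : Option Nat := s.findIdx? (· = c)

-- the pair that A has already emitted but B still owes, at suffix position i with last occurrence p?
def pvPend (l : List Char) (c : Char) (p? : Option Nat) (s : List Char) (i : Nat) :
    List (Int × Int) :=
  match p?, pvNext c s with
  | some p, some d => if pvK l c p (i + d) then [((p : Int), ((i + d : Nat) : Int))] else []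
  | _, _ => []

-- append xs to c's bucket (no-op for a non-delimiter)
def pvPush (c : Char) (acc : pvTrip) (xs : List (Int × Int)) : pvTrip :=
  if c = '|' then (acc.1 ++ xs, acc.2.1, acc.2.2)
  else if c = '$' then (acc.1, acc.2.1 ++ xs, acc.2.2)
  else if c = '*' then (acc.1, acc.2.1, acc.2.2 ++ xs)
  else acc
theorem pvSingPrefix (t : List Char) (c : Char) : [c] <+: t ↔ t.head? = some c := by
  cases t with
  | nil => simp
  | cons x xs => simp [List.cons_prefix_cons, eq_comm]

theorem pvFind_singleton (s : List Char) (c : Char) :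
    PySem.Chars.find s [c] = (match s.findIdx? (· = c) with
      | none => (-1 : Int)
      | some d => (d : Int)) := by
  cases h : s.findIdx? (· = c) with
  | none =>
    have hmem : c ∉ s := by
      intro hc
      have := List.findIdx?_eq_none_iff.mp h c hc
      simp at this
    have : ¬ [c] <:+: s := by
      rw [List.singleton_infix_iff]; exact hmem
    simpa using (PySem.Chars.find_eq_neg_one_iff s [c]).mpr this
  | some d =>
    obtain ⟨hd, hpd, hmin⟩ := List.findIdx?_eq_some_iff_getElem.mp h
    have hmem : [c] <:+: s := (List.singleton_infix_iff _ _).mpr (by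
      have : s[d] = c := by simpa using hpd
      exact this ▸ List.getElem_mem hd)
    have h0 : (0 : Int) ≤ PySem.Chars.find s [c] := (PySem.Chars.find_nonneg_iff s [c]).mpr hmem
    obtain ⟨hpre, hfirst⟩ := PySem.Chars.find_spec h0
    set t := (PySem.Chars.find s [c]).toNat with ht
    have hst : s[t]? = some c := by
      have := (pvSingPrefix _ c).mp hpre
      rwa [List.head?_drop] at this
    have htlt : t < s.length := (List.getElem?_eq_some_iff.mp hst).1
    have htd : t = d := by
      by_contra hne
      rcases Nat.lt_or_ge t d with hlt | hge
      · have := hmin t hlt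
        have hs : s[t] = c := by
          have := List.getElem?_eq_some_iff.mp hst
          exact this.2
        simp [hs] at this
      · have hdt : d < t := by omega
        have := hfirst d hdt
        apply this
        rw [pvSingPrefix, List.head?_drop]
        have : s[d] = c := by simpa using hpd
        simp [this, hd]
    show PySem.Chars.find s [c] = (d : Int)
    omega

theorem pvPush_nil (c : Char) (acc : pvTrip) : pvPush c acc [] = acc := by
  unfold pvPush; split_ifs <;> simp

set_option maxHeartbeats 2000000 in
theorem pvStepA_eq (l : List Char) (i : Nat) (ch : Char) (rest : List Char) (acc : pvTrip)
    (hd : l.drop i = ch :: rest) :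
    pvStepA l i ch acc = pvPush ch acc (pvPend l ch (some i) rest (i + 1)) := by
  have hi : i < l.length := by
    by_contra hge
    rw [List.drop_eq_nil_of_le (by omega)] at hd; cases hd
  have hch : l[i] = ch := by
    rw [List.drop_eq_getElem_cons hi] at hd; exact (List.cons.injEq .. ▸ hd).1
  have hrest : rest = l.drop (i + 1) := by
    rw [List.drop_eq_getElem_cons hi] at hd; exact ((List.cons.injEq .. ▸ hd).2).symm
  by_cases hlast : i = l.length - 1
  · have hre : rest = [] := by
      rw [hrest, List.drop_eq_nil_of_le (by omega)]
    subst hre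
    simp [pvStepA, hlast, pvPend, pvNext, pvPush_nil]
  · by_cases hdel : ch = '|' ∨ ch = '$' ∨ ch = '*'
    case neg =>
      have hmem : ch ∉ (['$', '|', '*'] : List Char) := by
        have hdel' : ¬(ch = '$' ∨ ch = '|' ∨ ch = '*') := by tauto
        simpa using hdel'
      have hpush : ∀ xs, pvPush ch acc xs = acc := by
        intro xs
        have h1 : ¬ ch = '|' := by tauto
        have h2 : ¬ ch = '$' := by tauto
        have h3 : ¬ ch = '*' := by tauto
        unfold pvPush; simp [h1, h2, h3]
      simp [pvStepA, hmem, hpush]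
    case pos =>
      have hi1 : i + 1 < l.length := by omega
      have hmem : ch ∈ (['$', '|', '*'] : List Char) := by
        rcases hdel with h | h | h <;> simp [h]
      -- the pieces
      have hget1 : PySem.List.pyGet? l ((i : Int) + 1) = some l[i + 1] := by
        have : ((i : Int) + 1) = ((i + 1 : Nat) : Int) := by push_cast; ring
        rw [this, PySem.List.pyGet?_natCast, List.getElem?_eq_getElem hi1]
      have hsub : PySem.List.slice l (some ((i : Int) + 1)) (some (PySem.List.len l)) = rest := by
        have h1 : ((i : Int) + 1) = ((i + 1 : Nat) : Int) := by push_cast; ring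
        rw [h1, PySem.List.len_eq, PySem.List.slice_natCast, hrest]
        exact List.take_of_length_le (by simp)
      have hfind : PySem.Chars.find rest [ch] = (match pvNext ch rest with
          | none => (-1 : Int) | some d => (d : Int)) := by
        rw [pvFind_singleton]; rfl
      cases hnx : pvNext ch rest with
      | none =>
        have hfd : PySem.Chars.find rest [ch] = (-1 : Int) := by rw [hfind, hnx]
        have hpend : pvPend l ch (some i) rest (i + 1) = [] := by simp [pvPend, hnx]
        rw [hpend, pvPush_nil]
        simp only [pvStepA, hsub, hfd]
        split_ifs <;> first | rfl | (exact absurd rfl (by assumption))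
      | some d =>
        have hfd : PySem.Chars.find rest [ch] = (d : Int) := by rw [hfind, hnx]
        have hnx' : List.findIdx? (fun x => decide (x = ch)) rest = some d := hnx
        obtain ⟨hdlt, hpd, hmin⟩ := List.findIdx?_eq_some_iff_getElem.mp hnx'
        have hrd : rest[d] = ch := by simpa using hpd
        have hrlen : rest.length = l.length - (i + 1) := by rw [hrest, List.length_drop]
        have hjlt : i + 1 + d < l.length := by omega
        have hrk : ∀ k, k < rest.length → rest[k]? = l[i + 1 + k]? := by
          intro k hk
          rw [hrest, List.getElem?_drop]
        have hr0 : rest[0]? = l[i + 1]? := by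
          have := hrk 0 (by omega); simpa using this
        have hC4 : (d : Int) ≠ -1 := by omega
        by_cases c2 : l[i + 1] = ch
        · -- closing quote immediately follows: third guard false, pvK false
          have hg3 : ¬ (((PySem.List.pyGet? l ((i : Int) - 1) ≠ some ch ∨ i = 0) ∧
              PySem.List.pyGet? l ((i : Int) + 1) ≠ some ch)) := by
            rw [hget1, c2]; simp
          have hpend : pvPend l ch (some i) rest (i + 1) = [] := by
            have hK : ¬ pvK l ch i ((i + 1) + d) := by
              unfold pvK
              rw [List.getD_eq_getElem l ' ' hi1, c2]
              simp
            simp [pvPend, hnx, hK]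
          rw [hpend, pvPush_nil]
            
          simp only [pvStepA, hsub, hfd]
          split_ifs <;> rfl
        · -- now d ≥ 1
          have hdpos : 0 < d := by
            rcases Nat.eq_zero_or_pos d with h0 | h
            · exfalso; apply c2
              have h1 : rest[0]? = some ch := by
                subst h0; rw [List.getElem?_eq_getElem hdlt, hrd]
              rw [hr0, List.getElem?_eq_getElem hi1] at h1
              simpa using h1
            · exact h
          have hC5 : PySem.List.pyGet? rest ((d : Int) - 1) = some l[i + d] := by
            have h1 : ((d : Int) - 1) = ((d - 1 : Nat) : Int) := by
              rw [Nat.cast_sub (by omega)]; simp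
            rw [h1, PySem.List.pyGet?_natCast, hrk (d - 1) (by omega)]
            have : i + 1 + (d - 1) = i + d := by omega
            rw [this, List.getElem?_eq_getElem (by omega)]
          have hlid : l[i + 1 + d] = ch := by
            have := hrk d hdlt
            rw [List.getElem?_eq_getElem hdlt, List.getElem?_eq_getElem hjlt] at this
            simp at this; rw [← this, hrd]
          -- the set() test: the slice contains l[i+1] ≠ ch
          have hany : (PySem.List.slice l (some (i : Int)) (some ((i : Int) + (d : Int) + 2))).any
              (fun x => x ≠ ch) = true := by
            have he : ((i : Int) + (d : Int) + 2) = ((i + d + 2 : Nat) : Int) := by push_cast; ring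
            rw [he, PySem.List.slice_natCast]
            have hmm : l[i + 1] ∈ (l.drop i).take (i + d + 2 - i) := by
              have h2 : i + d + 2 - i = d + 2 := by omega
              rw [h2]
              have : (l.drop i)[1]? = some l[i + 1] := by
                rw [List.getElem?_drop]
                have : i + 1 < l.length := hi1
                rw [List.getElem?_eq_getElem this]
              have ht : ((l.drop i).take (d + 2))[1]? = some l[i + 1] := by
                rw [List.getElem?_take_of_lt (by omega), List.getElem?_drop,
                  List.getElem?_eq_getElem hi1]
              exact List.mem_of_getElem? ht
            rw [List.any_eq_true]
            exact ⟨l[i + 1], hmm, by simpa using c2⟩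
          -- getD forms of the pvK components
          have hgetD1 : l.getD (i + 1) ' ' = l[i + 1] := List.getD_eq_getElem l ' ' hi1
          have hgetDj : l.getD (i + 1 + d - 1) ' ' = l[i + d] := by
            have he : i + 1 + d - 1 = i + d := by omega
            rw [he, List.getD_eq_getElem l ' ' (by omega)]
          have hg3iff : (PySem.List.pyGet? l ((i : Int) - 1) ≠ some ch ∨ i = 0) ↔
              (i = 0 ∨ l.getD (i - 1) ' ' ≠ ch) := by
            rcases Nat.eq_zero_or_pos i with h0 | hpos
            · subst h0; simp
            · have h1 : ((i : Int) - 1) = ((i - 1 : Nat) : Int) := by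
                rw [Nat.cast_sub (by omega)]; simp
              rw [h1, PySem.List.pyGet?_natCast, List.getElem?_eq_getElem (by omega),
                List.getD_eq_getElem l ' ' (by omega)]
              constructor
              · rintro (h | h); · right; simpa using h
                · omega
              · rintro (h | h); · omega
                · left; simpa using h
          have hpend : pvPend l ch (some i) rest (i + 1) =
              (if pvK l ch i (i + 1 + d) then [((i : Int), ((i + 1 + d : Nat) : Int))] else []) := by
            simp [pvPend, hnx]
          rw [hpend]
          simp only [pvStepA, hsub, hfd, hget1]
          rw [if_pos hlast]
          by_cases c1 : l[i + 1] = ' '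
          · rw [if_neg (by simp [c1])]
            have hK : ¬ pvK l ch i (i + 1 + d) := by unfold pvK; rw [hgetD1, c1]; simp
            rw [if_neg hK, pvPush_nil]
          · rw [if_pos ⟨hmem, by simp [c1]⟩]
            by_cases c3 : i = 0 ∨ l.getD (i - 1) ' ' ≠ ch
            · rw [if_pos ⟨hg3iff.mpr c3, by simp [c2]⟩, if_pos hC4, hC5]
              by_cases c4 : l[i + d] = ' '
              · rw [if_neg (by simp [c4])]
                have hK : ¬ pvK l ch i (i + 1 + d) := by
                  unfold pvK; rw [hgetDj, hgetD1]; simp [c4]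
                rw [if_neg hK, pvPush_nil]
              · rw [if_pos (by simp [c4]), if_pos hany]
                have hK : pvK l ch i (i + 1 + d) := by
                  unfold pvK; rw [hgetDj, hgetD1]
                  simp only [Bool.and_eq_true, Bool.or_eq_true, decide_eq_true_eq,
                    beq_iff_eq, ne_eq]
                  exact ⟨⟨⟨c1, c2⟩, c3⟩, c4⟩
                rw [if_pos hK]
                rw [show ((i : Int) + (d : Int) + 1) = ((i + 1 + d : Nat) : Int) by push_cast; ring]
                unfold pvPush
                split_ifs <;> simp_all
            · rw [if_neg (by rw [hg3iff]; tauto)]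
              have h0 : ¬ i = 0 := fun h => c3 (Or.inl h)
              have hgc : l.getD (i - 1) ' ' = ch := by
                by_contra hgc; exact c3 (Or.inr hgc)
              have hK : ¬ pvK l ch i (i + 1 + d) := by
                unfold pvK; rw [hgetDj, hgetD1]
                simp only [Bool.and_eq_true, Bool.or_eq_true, decide_eq_true_eq,
                  beq_iff_eq, ne_eq]
                rintro ⟨⟨-, h | h⟩, -⟩
                · exact h0 h
                · exact h hgc
              rw [if_neg hK, pvPush_nil]


theorem pvPend_none (l : List Char) (c : Char) (s : List Char) (i : Nat) :
    pvPend l c none s i = [] := by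
  unfold pvPend; cases pvNext c s <;> rfl

theorem pvPend_cons_self (l : List Char) (c : Char) (p? : Option Nat) (rest : List Char)
    (i : Nat) :
    pvPend l c p? (c :: rest) i =
      (match p? with
       | some p => if pvK l c p i then [((p : Int), (i : Int))] else []
       | none => []) := by
  have hnx : pvNext c (c :: rest) = some 0 := by
    unfold pvNext; rw [List.findIdx?_cons]; simp
  unfold pvPend
  rw [hnx]
  cases p? <;> simp

theorem pvPend_cons_ne (l : List Char) (c ch : Char) (h : ch ≠ c) (p? : Option Nat)
    (rest : List Char) (i : Nat) :
    pvPend l c p? (ch :: rest) i = pvPend l c p? rest (i + 1) := by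
  have hnx : pvNext c (ch :: rest) = (pvNext c rest).map (· + 1) := by
    unfold pvNext; rw [List.findIdx?_cons]; simp [h]
  unfold pvPend
  rw [hnx]
  cases p? with
  | none => cases pvNext c rest <;> rfl
  | some p =>
    cases hn : pvNext c rest with
    | none => rfl
    | some d =>
      simp only [Option.map_some]
      have he : i + (d + 1) = i + 1 + d := by omega
      rw [he]

theorem pvBuckets_pipe : pvBuckets.get? '|' = some 0 := by decide
theorem pvBuckets_dollar : pvBuckets.get? '$' = some 1 := by decide
theorem pvBuckets_star : pvBuckets.get? '*' = some 2 := by decide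

theorem pvBuckets_none (ch : Char) (h1 : ch ≠ '|') (h2 : ch ≠ '$') (h3 : ch ≠ '*') :
    pvBuckets.get? ch = none := by
  have he : pvBuckets = ((PySem.Dict.empty.insert '|' 0).insert '$' 1).insert '*' 2 := by decide
  rw [he, PySem.Dict.get?_insert_of_ne _ _ h3, PySem.Dict.get?_insert_of_ne _ _ h2,
    PySem.Dict.get?_insert_of_ne _ _ h1]
  rfl

theorem pvPend_nil (l : List Char) (c : Char) (p? : Option Nat) (i : Nat) :
    pvPend l c p? [] i = [] := by
  cases p? <;> rfl

theorem pvLoop_inv (l : List Char) : ∀ (s : List Char) (i : Nat), s = l.drop i →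
    ∀ (st : PySem.Dict Char Nat) (acc : pvTrip),
    (pvLoopB l s i (st, acc)).2 =
      pvLoopA l s i (acc.1 ++ pvPend l '|' (st.get? '|') s i,
        acc.2.1 ++ pvPend l '$' (st.get? '$') s i,
        acc.2.2 ++ pvPend l '*' (st.get? '*') s i) := by
  intro s
  induction s with
  | nil =>
    intro i h st acc
    simp [pvLoopB, pvLoopA, pvPend_nil]
  | cons ch rest ih =>
    intro i h st acc
    have hd : l.drop i = ch :: rest := h.symm
    have hi : i < l.length := by
      by_contra hge
      rw [List.drop_eq_nil_of_le (by omega)] at hd; cases hd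
    have hrest : rest = l.drop (i + 1) := by
      rw [List.drop_eq_getElem_cons hi] at hd
      exact ((List.cons.injEq .. ▸ hd).2).symm
    simp only [pvLoopB, pvLoopA]
    rw [pvStepA_eq l i ch rest _ hd]
    by_cases h1 : ch = '|'
    · subst h1
      have hB : pvStepB l i '|' (st, acc) =
          (st.insert '|' i,
            match st.get? '|' with
            | none => acc
            | some p => if pvK l '|' p i then
                (acc.1 ++ [((p : Int), (i : Int))], acc.2.1, acc.2.2) else acc) := by
        simp [pvStepB, pvBuckets_pipe]
      rw [hB, ih (i + 1) hrest]
      congr 1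
      cases hst : st.get? '|' with
      | none =>
        simp [PySem.Dict.get?_insert, pvPend_cons_self, pvPend_cons_ne, pvPush]
      | some p =>
        by_cases hK : pvK l '|' p i <;>
          simp [hK, PySem.Dict.get?_insert, pvPend_cons_self, pvPend_cons_ne, pvPush,
            List.append_assoc]
    · by_cases h2 : ch = '$'
      · subst h2
        have hB : pvStepB l i '$' (st, acc) =
            (st.insert '$' i,
              match st.get? '$' with
              | none => acc
              | some p => if pvK l '$' p i then
                  (acc.1, acc.2.1 ++ [((p : Int), (i : Int))], acc.2.2) else acc) := by
          simp [pvStepB, pvBuckets_dollar]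
        rw [hB, ih (i + 1) hrest]
        congr 1
        cases hst : st.get? '$' with
        | none =>
          simp [PySem.Dict.get?_insert, pvPend_cons_self, pvPend_cons_ne, pvPush]
        | some p =>
          by_cases hK : pvK l '$' p i <;>
            simp [hK, PySem.Dict.get?_insert, pvPend_cons_self, pvPend_cons_ne, pvPush,
              List.append_assoc]
      · by_cases h3 : ch = '*'
        · subst h3
          have hB : pvStepB l i '*' (st, acc) =
              (st.insert '*' i,
                match st.get? '*' with
                | none => acc
                | some p => if pvK l '*' p i then
                    (acc.1, acc.2.1, acc.2.2 ++ [((p : Int), (i : Int))]) else acc) := by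
            simp [pvStepB, pvBuckets_star]
          rw [hB, ih (i + 1) hrest]
          congr 1
          cases hst : st.get? '*' with
          | none =>
            simp [PySem.Dict.get?_insert, pvPend_cons_self, pvPend_cons_ne, pvPush]
          | some p =>
            by_cases hK : pvK l '*' p i <;>
              simp [hK, PySem.Dict.get?_insert, pvPend_cons_self, pvPend_cons_ne, pvPush,
                List.append_assoc]
        · have hnone : pvBuckets.get? ch = none := pvBuckets_none ch h1 h2 h3
          have hB : pvStepB l i ch (st, acc) = (st, acc) := by
            simp [pvStepB, hnone]
          have hpush : ∀ (t : pvTrip) xs, pvPush ch t xs = t := by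
            intro t xs; unfold pvPush; simp [h1, h2, h3]
          rw [hB, ih (i + 1) hrest, hpush]
          congr 1
          simp [pvPend_cons_ne l _ ch h1, pvPend_cons_ne l _ ch h2, pvPend_cons_ne l _ ch h3]

theorem pvEdge (l : List Char) (hl : l ≠ []) :
    PySem.List.pyGet? l (PySem.List.len l - 1) = PySem.List.pyGet? l (-1) := by
  rw [PySem.List.pyGet?_neg_one, PySem.List.len_eq]
  have h1 : 1 ≤ l.length := List.length_pos_of_ne_nil hl
  have h2 : ((l.length : Int) - 1) = ((l.length - 1 : Nat) : Int) := by
    rw [Nat.cast_sub h1]; simp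
  rw [h2, PySem.List.pyGet?_natCast, List.getLast?_eq_getElem?]

-- ===== VERDICT (by name: the statement is the Claim_ definition above) =====
theorem get_pipes_dollars_tags_tuples_spec : Claim_equal_get_pipes_dollars_tags_tuples := by
  unfold Claim_equal_get_pipes_dollars_tags_tuples
  intro content _
  unfold Spec_get_pipes_dollars_tags_tuples
  unfold get_pipes_dollars_tags_tuples get_pipes_dollars_tags_tuples_alt
  by_cases hnil : content.toList = []
  · rw [hnil]
    simp [pvLoopA, pvLoopB, PySem.List.count_eq]
  · have heq := pvEdge content.toList hnil
    simp only [heq]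
    have hloop : (pvLoopB content.toList content.toList 0 (PySem.Dict.empty, ([], [], []))).2 =
        pvLoopA content.toList content.toList 0 ([], [], []) := by
      rw [pvLoop_inv content.toList content.toList 0 (by simp) PySem.Dict.empty ([], [], [])]
      have he : ∀ c : Char, (PySem.Dict.empty : PySem.Dict Char Nat).get? c = none := by
        intro c; rfl
      simp [he, pvPend_none]
    simp only [hloop]
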